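-- pv_equiv track=rewrite | github.com/KendrewChan/LeetCodeQns | 2321-maximum-score-of-spliced-array/2321-maximum-score-of-spliced-array.py | getMaxInc
-- ===== SOURCE A (Python) =====
-- def getMaxInc(nums1, nums2):
--     n = len(nums1)
--     maxInc = 0
--     curr_increment = 0
--     for i in range(n):
--         n1, n2 = nums1[i], nums2[i]
--         curr_increment = max(0,curr_increment+n2-n1)
--         maxInc = max(maxInc, curr_increment)
--     return maxInc
-- ===== SOURCE B (Python) =====
-- def getMaxInc(nums1, nums2):
--     best = pref = minPref = 0
--     for a, b in zip(nums1, nums2):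
--         pref += b - a
--         best = max(best, pref - minPref)
--         minPref = min(minPref, pref)
--     return best
-- ===== Notes on version B (the rewrite author's own statement) =====
-- stated objective: alternative
-- what changed: Replaces A's Kadane accumulator (reset-to-zero running segment sum) with a prefix-sum formulation over zip: maintain the cumulative sum of differences and its running minimum, and take the best prefix - minPrefix gap.
import Mathlib
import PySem

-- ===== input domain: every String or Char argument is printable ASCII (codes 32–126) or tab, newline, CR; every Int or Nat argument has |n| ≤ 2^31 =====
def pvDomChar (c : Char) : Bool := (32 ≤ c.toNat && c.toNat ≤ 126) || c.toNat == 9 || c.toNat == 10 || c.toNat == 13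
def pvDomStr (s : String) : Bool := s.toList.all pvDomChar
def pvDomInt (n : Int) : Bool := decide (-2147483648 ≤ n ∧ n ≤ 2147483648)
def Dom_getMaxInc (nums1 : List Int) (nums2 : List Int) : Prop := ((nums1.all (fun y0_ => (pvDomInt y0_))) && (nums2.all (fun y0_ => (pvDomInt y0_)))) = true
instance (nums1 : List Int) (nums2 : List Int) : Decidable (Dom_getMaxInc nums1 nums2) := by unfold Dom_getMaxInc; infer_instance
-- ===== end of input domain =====

-- B replaces A's reset-to-zero Kadane accumulator by a prefix-sum + running-minimum-prefix pass over zip (alternative decomposition, same cost).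

-- ===== PORT A =====
-- A's loop `for i in range(n)` with indexing; pyGetD is exact under Pre_ (index in range).
def getMaxInc (nums1 : List Int) (nums2 : List Int) : Int :=
  ((PySem.List.pyRange 0 (nums1.length : Int) 1).foldl
    (fun (st : Int × Int) i =>
      let n1 := PySem.List.pyGetD nums1 i 0
      let n2 := PySem.List.pyGetD nums2 i 0
      let curr := max 0 (st.2 + n2 - n1)
      (max st.1 curr, curr))
    (0, 0)).1

-- ===== PORT B =====
def getMaxInc_alt (nums1 : List Int) (nums2 : List Int) : Int :=
  ((nums1.zip nums2).foldl
    (fun (st : Int × Int × Int) p =>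
      let pref := st.2.1 + (p.2 - p.1)
      let best := max st.1 (pref - st.2.2)
      let minPref := min st.2.2 pref
      (best, pref, minPref))
    (0, 0, 0)).1

-- ===== PRECONDITION & SPEC =====
-- A indexes nums2 at every i < len(nums1) and raises IndexError when nums2 is shorter; exactly those inputs are excluded.
def Pre_getMaxInc (nums1 : List Int) (nums2 : List Int) : Prop := nums1.length ≤ nums2.length
instance (nums1 : List Int) (nums2 : List Int) : Decidable (Pre_getMaxInc nums1 nums2) := by unfold Pre_getMaxInc; infer_instance
def pvWitness_getMaxInc : List Int × List Int := ([1, 3, 5, 4], [2, 1, 7, 3])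

def Spec_getMaxInc (nums1 : List Int) (nums2 : List Int) (out : Int) : Prop := out = getMaxInc_alt nums1 nums2
instance (nums1 : List Int) (nums2 : List Int) (out : Int) : Decidable (Spec_getMaxInc nums1 nums2 out) := by unfold Spec_getMaxInc; infer_instance

-- ===== CLAIM (what is proved, stated in full; the proofs are below) =====
def Claim_equal_getMaxInc : Prop := ∀ (nums1 : List Int) (nums2 : List Int), Dom_getMaxInc nums1 nums2 → Pre_getMaxInc nums1 nums2 → Spec_getMaxInc nums1 nums2 (getMaxInc nums1 nums2)

-- ===== LEMMAS AND PROOFS =====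

-- Kadane state (maxInc, curr) matches prefix state (best, pref, minPref) whenever
-- curr = pref - minPref, 0 ≤ best and minPref ≤ pref.
theorem pv_kadane_prefix (l : List (Int × Int)) :
    ∀ (best pref minPref : Int), 0 ≤ best → minPref ≤ pref →
    (l.foldl (fun (st : Int × Int) p =>
        let curr := max 0 (st.2 + p.2 - p.1)
        (max st.1 curr, curr)) (best, pref - minPref)).1
      = (l.foldl (fun (st : Int × Int × Int) p =>
        let pref := st.2.1 + (p.2 - p.1)
        let best := max st.1 (pref - st.2.2)
        let minPref := min st.2.2 pref
        (best, pref, minPref)) (best, pref, minPref)).1 := by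
  induction l with
  | nil => intro best pref minPref _ _; rfl
  | cons p l ih =>
      intro best pref minPref hb hm
      simp only [List.foldl_cons]
      have h1 : max 0 (pref - minPref + p.2 - p.1)
          = (pref + (p.2 - p.1)) - min minPref (pref + (p.2 - p.1)) := by omega
      have h2 : max best (max 0 (pref - minPref + p.2 - p.1))
          = max best ((pref + (p.2 - p.1)) - minPref) := by omega
      rw [h2, h1]
      exact ih (max best ((pref + (p.2 - p.1)) - minPref)) (pref + (p.2 - p.1))
        (min minPref (pref + (p.2 - p.1)))
        (le_trans hb (le_max_left _ _)) (min_le_right _ _)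

-- A's indexed loop equals the fold over zip when nums2 is long enough.
theorem pv_index_to_zip (nums1 nums2 : List Int) (h : nums1.length ≤ nums2.length)
    (st : Int × Int) :
    (PySem.List.pyRange 0 (nums1.length : Int) 1).foldl
      (fun (s : Int × Int) i =>
        let n1 := PySem.List.pyGetD nums1 i 0
        let n2 := PySem.List.pyGetD nums2 i 0
        let curr := max 0 (s.2 + n2 - n1)
        (max s.1 curr, curr)) st
    = (nums1.zip nums2).foldl (fun (s : Int × Int) p =>
        let curr := max 0 (s.2 + p.2 - p.1)
        (max s.1 curr, curr)) st := by
  have hlen : ((nums1.zip nums2).length : Int) = (nums1.length : Int) := by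
    simp [List.length_zip, Nat.min_eq_left h]
  rw [← hlen]
  rw [← PySem.List.foldl_pyRange_zero_pyGetD' (nums1.zip nums2) (0, 0)
    (fun (s : Int × Int) p =>
        let curr := max 0 (s.2 + p.2 - p.1)
        (max s.1 curr, curr)) st]
  apply PySem.List.foldl_congr_mem
  intro s i hi
  have hi' := (PySem.List.mem_pyRange_one).1 hi
  rw [hlen] at hi'
  have h0 : (0 : Int) ≤ i := hi'.1
  have h1 : i.toNat < nums1.length := by omega
  have h2 : i.toNat < nums2.length := by omega
  have hz : i.toNat < (nums1.zip nums2).length := by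
    simp [List.length_zip]; omega
  rw [PySem.List.pyGetD_eq_getElem nums1 0 h0 (by omega),
      PySem.List.pyGetD_eq_getElem nums2 0 h0 (by omega),
      PySem.List.pyGetD_eq_getElem (nums1.zip nums2) (0, 0) h0 (by omega)]
  simp [List.getElem_zip]

-- ===== VERDICT (by name: the statement is the Claim_ definition above) =====
theorem getMaxInc_spec : Claim_equal_getMaxInc := by
  intro nums1 nums2 _ hpre
  unfold Spec_getMaxInc getMaxInc getMaxInc_alt
  rw [pv_index_to_zip nums1 nums2 hpre]
  have := pv_kadane_prefix (nums1.zip nums2) 0 0 0 le_rfl le_rfl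
  simpa using this
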